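-- pv_equiv track=rewrite | github.com/grefl/every_days | useful_nuggets/distro.py | parse_to_end
-- ===== SOURCE A (Python) =====
-- def parse_to_end(bytestring):
--     """
--     Gets all the chars from the byte string until it reaches the end.
--     Is it pythonic, heck no! But I don't care since it works and I'm just experimenting.
--     """
--     idx = 0
--     string = []
--     while idx < len(bytestring):
--         c = chr(bytestring[idx])
--         idx +=1
--         if c == '\n':
--             continue
--         string.append(c)
--     return ''.join(string)
-- ===== SOURCE B (Python) =====
-- def parse_to_end(bytestring):
--     # Split the input on newline bytes into segments (delimiter search per
--     # segment, not a per-character filter), bulk-decode each segment, join.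
--     pieces = []
--     start = 0
--     while True:
--         try:
--             stop = bytestring.index(10, start)
--         except ValueError:
--             pieces.append(bytestring[start:])
--             break
--         pieces.append(bytestring[start:stop])
--         start = stop + 1
--     return ''.join(''.join(map(chr, piece)) for piece in pieces)
-- ===== Notes on version B (the rewrite author's own statement) =====
-- stated objective: alternative
-- what changed: Replaced A's per-character while loop (test each chr against '\n', append survivors) by a split-on-delimiter algorithm: repeatedly locate the next newline byte with list.index(10, start), collect the newline-free segments between delimiters, bulk-decode each segment and concatenate.
import Mathlib
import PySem

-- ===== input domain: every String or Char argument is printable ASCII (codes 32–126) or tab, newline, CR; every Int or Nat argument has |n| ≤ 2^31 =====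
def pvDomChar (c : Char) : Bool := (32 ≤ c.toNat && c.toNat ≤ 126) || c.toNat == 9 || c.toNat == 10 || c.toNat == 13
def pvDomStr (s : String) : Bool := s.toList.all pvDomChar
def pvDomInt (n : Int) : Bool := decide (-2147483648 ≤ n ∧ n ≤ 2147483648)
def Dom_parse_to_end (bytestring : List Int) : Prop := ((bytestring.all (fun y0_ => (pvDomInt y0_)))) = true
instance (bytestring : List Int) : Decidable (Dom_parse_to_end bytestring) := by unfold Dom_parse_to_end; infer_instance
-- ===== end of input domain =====

-- B replaces A's per-character filtering loop by split-on-newline: find each newline byte's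
-- index, collect the segments between them, bulk-decode each segment and join; objective: alternative.


-- ===== PORT A =====
-- while idx < len(bytestring): c = chr(bytestring[idx]); idx += 1; if c == '\n': continue; string.append(c)
def parse_to_end (bytestring : List Int) : String :=
  String.ofList (bytestring.foldl
    (fun string b =>
      let c := Char.ofNat b.toNat      -- chr(b); exact on Pre_ (valid, non-surrogate code points)
      if c = '\n' then string else string ++ [c])
    [])

-- ===== PORT B =====
-- hand port of bytestring.index(10, start), exact: absolute index of the first 10 at position ≥ start, none = ValueError
def pvIndexFrom (l : List Int) (start : Nat) : Option Nat :=
  (PySem.List.index? (l.drop start) 10).map (start + ·)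

theorem pvIndexFrom_lt {l : List Int} {start stop : Nat}
    (h : pvIndexFrom l start = some stop) : start ≤ stop ∧ stop < l.length := by
  unfold pvIndexFrom at h
  obtain ⟨j, hj, hmap⟩ := Option.map_eq_some_iff.mp h
  obtain ⟨pre, suf, hxs, hlen, -⟩ := (PySem.List.index?_eq_some_iff _ _ _).mp hj
  have hjl : j < (l.drop start).length := by
    rw [hxs]; simp [← hlen]
  rw [List.length_drop] at hjl
  omega

-- the while loop of B: state (start, pieces); pieces returned in order (appends become cons + final order)
def parse_to_end_alt_go (l : List Int) (start : Nat) : List (List Int) :=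
  match h : pvIndexFrom l start with
  | none => [l.drop start]                                        -- pieces.append(bytestring[start:]); break
  | some stop =>
      (l.drop start).take (stop - start) :: parse_to_end_alt_go l (stop + 1)  -- bytestring[start:stop]; start = stop+1
termination_by l.length - start
decreasing_by
  have := pvIndexFrom_lt h; omega

-- ''.join(''.join(map(chr, piece)) for piece in pieces)
def parse_to_end_alt (bytestring : List Int) : String :=
  String.ofList
    (((parse_to_end_alt_go bytestring 0).map
        (fun piece => piece.map (fun b => Char.ofNat b.toNat))).flatten)

-- ===== PRECONDITION & SPEC =====
-- Pre_ excludes code points outside 0..0x10FFFF, where chr (hence both A and B) raises ValueError, and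
-- surrogate code points 0xD800-0xDFFF, where A returns a lone-surrogate string that is not a
-- representable Lean String (not a value of the declared type); B behaves identically there.
def Pre_parse_to_end (bytestring : List Int) : Prop :=
  ∀ b ∈ bytestring, 0 ≤ b ∧ (b < 55296 ∨ (57344 ≤ b ∧ b < 1114112))
instance (bytestring : List Int) : Decidable (Pre_parse_to_end bytestring) := by
  unfold Pre_parse_to_end; infer_instance
def pvWitness_parse_to_end : List Int := [104, 10, 105]
def Spec_parse_to_end (bytestring : List Int) (out : String) : Prop := out = parse_to_end_alt bytestring
instance (bytestring : List Int) (out : String) : Decidable (Spec_parse_to_end bytestring out) := by unfold Spec_parse_to_end; infer_instance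

-- ===== CLAIM (what is proved, stated in full; the proofs are below) =====
def Claim_equal_parse_to_end : Prop := ∀ (bytestring : List Int), Dom_parse_to_end bytestring → Pre_parse_to_end bytestring → Spec_parse_to_end bytestring (parse_to_end bytestring)

-- ===== LEMMAS AND PROOFS =====

-- A's fold accumulates exactly the filtered mapped characters
theorem foldA_eq (l : List Int) :
    ∀ (acc : List Char),
      l.foldl
        (fun string b =>
          let c := Char.ofNat b.toNat
          if c = '\n' then string else string ++ [c]) acc
        = acc ++ (l.map (fun b => Char.ofNat b.toNat)).filter (fun c => c ≠ '\n') := by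
  induction l with
  | nil => intro acc; simp
  | cons b t ih =>
    intro acc
    simp only [List.foldl, List.map, List.filter]
    by_cases hc : Char.ofNat b.toNat = '\n'
    · simp only [hc, ih]; simp
    · simp only [if_neg hc, ih]; simp [hc]

-- the pieces B collects flatten to the input with the newline bytes removed
theorem go_flatten (l : List Int) : ∀ (start : Nat),
    (parse_to_end_alt_go l start).flatten = (l.drop start).filter (fun b => b ≠ 10) := by
  intro start
  fun_induction parse_to_end_alt_go l start with
  | case1 start h =>
    have hnone : PySem.List.index? (l.drop start) (10:Int) = none := by
      unfold pvIndexFrom at h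
      exact Option.map_eq_none_iff.mp h
    have hnot : (10:Int) ∉ l.drop start := (PySem.List.index?_eq_none_iff _ _).mp hnone
    have : (l.drop start).filter (fun b => b ≠ (10:Int)) = l.drop start := by
      rw [List.filter_eq_self]
      intro a ha
      simp only [ne_eq, decide_eq_true_eq]
      exact fun hq => hnot (hq ▸ ha)
    simp only [List.flatten_cons, List.flatten_nil, List.append_nil]
    exact this.symm
  | case2 start stop h ih =>
    have h' := h
    unfold pvIndexFrom at h'
    obtain ⟨j, hj, hmap⟩ := Option.map_eq_some_iff.mp h'
    have hstop : stop = start + j := hmap.symm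
    obtain ⟨pre, suf, hxs, hlen, hpre10⟩ := (PySem.List.index?_eq_some_iff _ _ _).mp hj
    have htake : (l.drop start).take (stop - start) = pre := by
      have : stop - start = pre.length := by omega
      rw [this, hxs, List.take_left]
    have hdrop : l.drop (stop + 1) = suf := by
      have h1 : l.drop (stop + 1) = (l.drop start).drop (j + 1) := by
        rw [List.drop_drop]; congr 1; omega
      rw [h1, hxs]
      have : pre ++ 10 :: suf = (pre ++ [(10:Int)]) ++ suf := by simp
      rw [this, List.drop_left' (by simp [hlen])]
    have hfp : pre.filter (fun b => b ≠ (10:Int)) = pre := by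
      rw [List.filter_eq_self]
      intro a ha
      simp only [ne_eq, decide_eq_true_eq]
      exact fun hq => hpre10 (hq ▸ ha)
    simp only [List.flatten_cons]
    rw [htake, ih, hdrop, hxs, List.filter_append, hfp]
    simp

-- ===== VERDICT (by name: the statement is the Claim_ definition above) =====
theorem parse_to_end_spec : Claim_equal_parse_to_end := by
  intro l _ hpre
  unfold Spec_parse_to_end parse_to_end parse_to_end_alt
  apply congrArg
  rw [← List.map_flatten, go_flatten l 0, List.drop_zero, foldA_eq l [], List.nil_append,
      List.filter_map]
  apply congrArg
  apply List.filter_congr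
  intro b hb
  have hb' := hpre b hb
  simp only [Function.comp]
  by_cases h10 : b = (10:Int)
  · subst h10; decide
  · have hval : Nat.isValidChar b.toNat := by
      unfold Nat.isValidChar
      obtain ⟨h0, hr⟩ := hb'
      omega
    have htn : (Char.ofNat b.toNat).toNat = b.toNat := by
      simp [Char.ofNat, hval, Char.ofNatAux, Char.toNat]
    have hne : Char.ofNat b.toNat ≠ '\n' := by
      intro he
      have : b.toNat = 10 := by rw [← htn, he]; decide
      omega
    simp [hne, h10]
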